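-- pv_equiv track=rewrite | github.com/kawaipato/Programmers | 프로그래머스/lv1/42862. 체육복/체육복.py | solution
-- ===== SOURCE A (Python) =====
-- def solution(n, lost, reserve):
--     save = set(lost) & set(reserve)
--     l = set(lost) - save
--     r = set(reserve) - save
--     for x in sorted(r):
--         if x - 1 in l:
--             l.remove(x-1)
--         elif x + 1 in l:
--             l.remove(x+1)
--     return n - len(l)
-- ===== SOURCE B (Python) =====
-- def solution(n, lost, reserve):
--     # Two-pointer merge over the two sorted difference lists instead of
--     # mutating a set while iterating over sorted reserves.
--     L = sorted(set(lost) - set(reserve))   # still need a spare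
--     R = sorted(set(reserve) - set(lost))   # have a spare to lend
--     i = j = m = 0
--     while i < len(L) and j < len(R):
--         if L[i] < R[j] - 1:
--             i += 1
--         elif L[i] > R[j] + 1:
--             j += 1
--         else:
--             m += 1
--             i += 1
--             j += 1
--     return n - (len(L) - m)
-- ===== Notes on version B (the rewrite author's own statement) =====
-- stated objective: alternative
-- what changed: Replaces the loop that mutates a set while scanning sorted reserves by a two-pointer merge over the two sorted difference lists, counting matches without any set mutation.
import Mathlib
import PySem

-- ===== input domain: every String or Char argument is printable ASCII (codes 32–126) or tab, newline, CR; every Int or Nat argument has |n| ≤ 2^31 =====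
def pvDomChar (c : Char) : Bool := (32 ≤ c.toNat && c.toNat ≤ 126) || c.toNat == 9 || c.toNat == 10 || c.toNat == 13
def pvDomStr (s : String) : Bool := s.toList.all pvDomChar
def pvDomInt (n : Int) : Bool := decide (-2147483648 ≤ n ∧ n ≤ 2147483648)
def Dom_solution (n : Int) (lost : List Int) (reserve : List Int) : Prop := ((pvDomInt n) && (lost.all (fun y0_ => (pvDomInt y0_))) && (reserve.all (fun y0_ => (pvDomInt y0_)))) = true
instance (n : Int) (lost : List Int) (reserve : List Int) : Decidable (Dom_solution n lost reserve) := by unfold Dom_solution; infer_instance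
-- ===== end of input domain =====

-- B replaces A's set-mutating loop over sorted reserves by a two-pointer merge
-- of the two sorted difference lists (alternative decomposition, same cost).

-- ===== PORT A =====
-- one loop step of A: 'if x-1 in l: l.remove(x-1) elif x+1 in l: l.remove(x+1)'
-- (remove is executed only under the membership guard, where it equals discard)
def pvStepA (l : PySem.Set Int) (x : Int) : PySem.Set Int :=
  if PySem.Set.contains l (x - 1) then PySem.Set.discard l (x - 1)
  else if PySem.Set.contains l (x + 1) then PySem.Set.discard l (x + 1)
  else l

def solution (n : Int) (lost : List Int) (reserve : List Int) : Int :=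
  let save := PySem.Set.inter (PySem.Set.ofList lost) (PySem.Set.ofList reserve)
  let l := PySem.Set.diff (PySem.Set.ofList lost) save
  let r := PySem.Set.diff (PySem.Set.ofList reserve) save
  let lFinal := (PySem.List.sorted r (fun x => x) false).foldl pvStepA l
  n - (lFinal.length : Int)

-- ===== PORT B =====
-- the two-pointer while loop of Source B, as recursion on the two sorted lists
def pvTwoPtr : List Int → List Int → Int
  | [], _ => 0
  | _ :: _, [] => 0
  | a :: L, b :: R =>
    if a < b - 1 then pvTwoPtr L (b :: R)
    else if a > b + 1 then pvTwoPtr (a :: L) R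
    else 1 + pvTwoPtr L R
termination_by L R => L.length + R.length

def solution_alt (n : Int) (lost : List Int) (reserve : List Int) : Int :=
  let L := PySem.List.sorted
    (PySem.Set.diff (PySem.Set.ofList lost) (PySem.Set.ofList reserve)) (fun x => x) false
  let R := PySem.List.sorted
    (PySem.Set.diff (PySem.Set.ofList reserve) (PySem.Set.ofList lost)) (fun x => x) false
  n - ((L.length : Int) - pvTwoPtr L R)

-- ===== PRECONDITION & SPEC =====
def Spec_solution (n : Int) (lost : List Int) (reserve : List Int) (out : Int) : Prop := out = solution_alt n lost reserve
instance (n : Int) (lost : List Int) (reserve : List Int) (out : Int) : Decidable (Spec_solution n lost reserve out) := by unfold Spec_solution; infer_instance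

-- ===== CLAIM (what is proved, stated in full; the proofs are below) =====
def Claim_equal_solution : Prop := ∀ (n : Int) (lost : List Int) (reserve : List Int), Dom_solution n lost reserve → Spec_solution n lost reserve (solution n lost reserve)

-- ===== LEMMAS AND PROOFS =====

-- A's loop body respects permutation of the state list
theorem pvStepA_perm (l l' : PySem.Set Int) (x : Int) (h : l.Perm l') :
    (pvStepA l x).Perm (pvStepA l' x) := by
  have hc : ∀ y : Int, PySem.Set.contains l y = PySem.Set.contains l' y := by
    intro y
    rw [Bool.eq_iff_iff, PySem.Set.contains_iff, PySem.Set.contains_iff]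
    exact h.mem_iff
  unfold pvStepA
  rw [hc (x - 1), hc (x + 1)]
  unfold PySem.Set.discard
  split_ifs with h1 h2
  · exact h.filter _
  · exact h.filter _
  · exact h

-- hence so does A's whole loop
theorem foldA_perm (R : List Int) (l l' : PySem.Set Int) (h : l.Perm l') :
    (R.foldl pvStepA l).Perm (R.foldl pvStepA l') := by
  induction R generalizing l l' with
  | nil => simpa using h
  | cons x R ih => exact ih _ _ (pvStepA_perm _ _ _ h)

-- a head smaller than x-1 is untouched by the step for x
theorem pvStepA_cons (a : Int) (L : List Int) (x : Int) (hx : a + 1 < x) :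
    pvStepA (a :: L) x = a :: pvStepA L x := by
  have e1 : (x - 1 == a) = false := beq_eq_false_iff_ne.mpr (by omega)
  have e2 : (x + 1 == a) = false := beq_eq_false_iff_ne.mpr (by omega)
  have e3 : (a == x - 1) = false := beq_eq_false_iff_ne.mpr (by omega)
  have e4 : (a == x + 1) = false := beq_eq_false_iff_ne.mpr (by omega)
  unfold pvStepA PySem.Set.discard
  simp only [PySem.Set.contains_eq_listContains, List.contains_cons, e1, e2, Bool.false_or,
    List.filter_cons, e3, e4, Bool.not_false, if_true]
  split_ifs <;> rfl

-- a head smaller than every reserve minus one survives the whole loop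
theorem foldA_cons_keep (R : List Int) (a : Int) (L : List Int)
    (h : ∀ x ∈ R, a + 1 < x) :
    R.foldl pvStepA (a :: L) = a :: R.foldl pvStepA L := by
  induction R generalizing L with
  | nil => rfl
  | cons x R ih =>
    have hx : a + 1 < x := h x (by simp)
    simp only [List.foldl_cons, pvStepA_cons a L x hx]
    exact ih _ (fun y hy => h y (by simp [hy]))

-- the defining equation of pvTwoPtr on two cons cells
theorem pvTwoPtr_cons (a : Int) (L : List Int) (b : Int) (R : List Int) :
    pvTwoPtr (a :: L) (b :: R) =
      if a < b - 1 then pvTwoPtr L (b :: R)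
      else if a > b + 1 then pvTwoPtr (a :: L) R
      else 1 + pvTwoPtr L R := by
  rw [pvTwoPtr]

-- main invariant: on strictly sorted, disjoint lists, the number of students A
-- leaves without a uniform plus B's two-pointer match count is the lost count
theorem pvMain (L R : List Int) (hL : L.Pairwise (· < ·)) (hR : R.Pairwise (· < ·))
    (hd : ∀ x ∈ L, x ∉ R) :
    ((R.foldl pvStepA L).length : Int) + pvTwoPtr L R = (L.length : Int) := by
  match L, R with
  | L, [] => cases L <;> simp [pvTwoPtr]
  | [], b :: R =>
    have h0 : pvStepA [] b = [] := by
      unfold pvStepA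
      simp [PySem.Set.contains_eq_listContains]
    have := pvMain [] R (by simp) (hR.tail) (by simp)
    simpa [pvTwoPtr, h0] using this
  | a :: L, b :: R =>
    have haL : ∀ y ∈ L, a < y := by
      intro y hy; exact (List.pairwise_cons.mp hL).1 y hy
    have hbR : ∀ y ∈ R, b < y := by
      intro y hy; exact (List.pairwise_cons.mp hR).1 y hy
    by_cases hab1 : a < b - 1
    · -- a can never be matched: keep it, advance the L pointer
      have hkeep : (b :: R).foldl pvStepA (a :: L) = a :: (b :: R).foldl pvStepA L := by
        apply foldA_cons_keep
        intro x hx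
        rcases List.mem_cons.mp hx with h | h
        · omega
        · have := hbR x h; omega
      have ih := pvMain L (b :: R) (hL.tail) hR
        (fun x hx => hd x (List.mem_cons_of_mem _ hx))
      rw [hkeep, pvTwoPtr_cons, if_pos hab1]
      simp only [List.length_cons]
      push_cast
      push_cast at ih
      omega
    · by_cases hab2 : a > b + 1
      · -- b matches nobody: the step for b does nothing, advance the R pointer
        have hnm : ∀ y : Int, y ∈ a :: L → b + 1 < y := by
          intro y hy
          rcases List.mem_cons.mp hy with h | h
          · omega
          · have := haL y h; omega
        have hstep : pvStepA (a :: L) b = a :: L := by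
          have c1 : PySem.Set.contains (a :: L) (b - 1) = false := by
            rw [← Bool.not_eq_true, PySem.Set.contains_iff]
            intro hmem; have := hnm _ hmem; omega
          have c2 : PySem.Set.contains (a :: L) (b + 1) = false := by
            rw [← Bool.not_eq_true, PySem.Set.contains_iff]
            intro hmem; have := hnm _ hmem; omega
          unfold pvStepA
          rw [c1, c2]; rfl
        have ih := pvMain (a :: L) R hL (hR.tail)
          (fun x hx hxR => hd x hx (List.mem_cons_of_mem _ hxR))
        rw [pvTwoPtr_cons, if_neg hab1, if_pos hab2]
        simpa [hstep] using ih
      · -- a = b-1 or a = b+1: the step for b removes exactly a; both sides match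
        have hne : a ≠ b := by
          intro hEq
          exact hd a (by simp) (by simp [hEq])
        have hLa : ∀ y ∈ L, y ≠ a := fun y hy => by have := haL y hy; omega
        have hfiltL : ∀ c : Int, c = a → PySem.Set.discard (a :: L) c = L := by
          intro c hc
          subst hc
          unfold PySem.Set.discard
          rw [List.filter_cons]
          simp only [beq_self_eq_true, Bool.not_true]
          exact List.filter_eq_self.mpr (fun y hy => by
            have hne := beq_eq_false_iff_ne.mpr (hLa y hy)
            simp [hne])
        have hstep : pvStepA (a :: L) b = L := by
          unfold pvStepA
          by_cases hcase : a = b - 1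
          · have c1 : PySem.Set.contains (a :: L) (b - 1) = true := by
              rw [PySem.Set.contains_iff]; simp [← hcase]
            rw [c1]; simp only [if_true]; exact hfiltL _ hcase.symm
          · have ha : a = b + 1 := by omega
            have c1 : PySem.Set.contains (a :: L) (b - 1) = false := by
              rw [← Bool.not_eq_true, PySem.Set.contains_iff]
              intro hmem
              rcases List.mem_cons.mp hmem with h | h
              · omega
              · have := haL _ h; omega
            have c2 : PySem.Set.contains (a :: L) (b + 1) = true := by
              rw [PySem.Set.contains_iff]; simp [← ha]
            rw [c1, c2]; simp only [if_true]; exact hfiltL _ ha.symm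
        have ih := pvMain L R (hL.tail) (hR.tail)
          (fun x hx hxR => hd x (List.mem_cons_of_mem _ hx) (List.mem_cons_of_mem _ hxR))
        rw [pvTwoPtr_cons, if_neg hab1, if_neg hab2]
        simp only [List.foldl_cons, hstep, List.length_cons]
        push_cast
        push_cast at ih
        omega
termination_by L.length + R.length
decreasing_by all_goals (simp only [List.length_cons]; omega)

-- the set difference A builds via 'save' is literally the direct set difference
theorem pvDiff_via_save (s t : List Int) :
    PySem.Set.diff (PySem.Set.ofList s)
      (PySem.Set.inter (PySem.Set.ofList s) (PySem.Set.ofList t))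
    = PySem.Set.diff (PySem.Set.ofList s) (PySem.Set.ofList t) := by
  unfold PySem.Set.diff
  apply List.filter_congr
  intro x hx
  congr 1
  rw [Bool.eq_iff_iff]
  constructor
  · intro h
    have : x ∈ PySem.Set.inter (PySem.Set.ofList s) (PySem.Set.ofList t) :=
      (PySem.Set.contains_iff _ _).mp (by simpa using h)
    exact (PySem.Set.contains_iff _ _).mpr ((PySem.Set.mem_inter _ _ _).mp this).2
  · intro h
    have : x ∈ PySem.Set.ofList t := (PySem.Set.contains_iff _ _).mp (by simpa using h)
    exact (PySem.Set.contains_iff _ _).mpr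
      ((PySem.Set.mem_inter _ _ _).mpr ⟨hx, this⟩)

-- same, with the intersection written in the other order (A reuses 'save')
theorem pvDiff_via_save' (s t : List Int) :
    PySem.Set.diff (PySem.Set.ofList t)
      (PySem.Set.inter (PySem.Set.ofList s) (PySem.Set.ofList t))
    = PySem.Set.diff (PySem.Set.ofList t) (PySem.Set.ofList s) := by
  unfold PySem.Set.diff
  apply List.filter_congr
  intro x hx
  congr 1
  rw [Bool.eq_iff_iff]
  constructor
  · intro h
    have : x ∈ PySem.Set.inter (PySem.Set.ofList s) (PySem.Set.ofList t) :=
      (PySem.Set.contains_iff _ _).mp (by simpa using h)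
    exact (PySem.Set.contains_iff _ _).mpr ((PySem.Set.mem_inter _ _ _).mp this).1
  · intro h
    have : x ∈ PySem.Set.ofList s := (PySem.Set.contains_iff _ _).mp (by simpa using h)
    exact (PySem.Set.contains_iff _ _).mpr
      ((PySem.Set.mem_inter _ _ _).mpr ⟨this, hx⟩)

-- strict sortedness of sorted applied to a Nodup list
theorem pvSorted_lt (xs : List Int) (h : xs.Nodup) :
    (PySem.List.sorted xs (fun x => x) false).Pairwise (· < ·) := by
  have hle := PySem.List.sorted_pairwise xs (fun x => x)
  have hnd : (PySem.List.sorted xs (fun x => x) false).Nodup :=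
    (PySem.List.sorted_perm xs (fun x => x) false).nodup_iff.mpr h
  exact (hle.and hnd).imp (fun {a b} hab => lt_of_le_of_ne hab.1 hab.2)

-- ===== VERDICT (by name: the statement is the Claim_ definition above) =====
theorem solution_spec : Claim_equal_solution := by
  intro n lost reserve _
  unfold Spec_solution
  simp only [solution, solution_alt]
  rw [pvDiff_via_save lost reserve, pvDiff_via_save' lost reserve]
  set L0 := PySem.Set.diff (PySem.Set.ofList lost) (PySem.Set.ofList reserve) with hL0
  set R0 := PySem.Set.diff (PySem.Set.ofList reserve) (PySem.Set.ofList lost) with hR0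
  set Ls := PySem.List.sorted L0 (fun x => x) false with hLs
  set Rs := PySem.List.sorted R0 (fun x => x) false with hRs
  have hL0nd : L0.Nodup := PySem.Set.nodup_diff _ _ (PySem.Set.nodup_ofList lost)
  have hR0nd : R0.Nodup := PySem.Set.nodup_diff _ _ (PySem.Set.nodup_ofList reserve)
  have hLlt : Ls.Pairwise (· < ·) := pvSorted_lt L0 hL0nd
  have hRlt : Rs.Pairwise (· < ·) := pvSorted_lt R0 hR0nd
  have hdisj : ∀ x ∈ Ls, x ∉ Rs := by
    intro x hx hxR
    have hxL0 : x ∈ L0 := (PySem.List.mem_sorted _ _ _ _).mp hx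
    have hxR0 : x ∈ R0 := (PySem.List.mem_sorted _ _ _ _).mp hxR
    have h1 := (PySem.Set.mem_diff _ _ _).mp hxL0
    have h2 := (PySem.Set.mem_diff _ _ _).mp hxR0
    exact h1.2 h2.1
  have hperm : L0.Perm Ls := (PySem.List.sorted_perm L0 (fun x => x) false).symm
  have hlen : (Rs.foldl pvStepA L0).length = (Rs.foldl pvStepA Ls).length :=
    (foldA_perm Rs L0 Ls hperm).length_eq
  have hmain := pvMain Ls Rs hLlt hRlt hdisj
  have hLslen : Ls.length = L0.length := (PySem.List.sorted_perm _ _ _).length_eq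
  rw [hlen]
  omega
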